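-- pv_equiv track=rewrite | github.com/awarebayes/Python1Sem | year_1/december/lectures/util.py | gen_rotation_matrix
-- ===== SOURCE A (Python) =====
-- def square_zeros(size):
--     return [[0] * (size) for i in range(size)]
--
-- def count_matrix(size):
--     A = square_zeros(size)
--     k = 1
--     for i in range(size):
--         for j in range(size):
--             A[i][j] = k
--             k += 1
--     return A
--
-- def rotate(mat):
--     mat.reverse()
--     size = len(mat)
--     for i in range(size):
--         for j in range(i):
--             mat[i][j], mat[j][i] = mat[j][i], mat[i][j]
--
-- def gen_rotation_matrix(size):
--     count_mat = count_matrix(size)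
--     key_mat = square_zeros(size * 2)
--     for i in range(size):
--         for j in range(size):
--             key_mat[i][j] = count_mat[i][j]
--     rotate(count_mat)
--
--     for i in range(size):
--         for j in range(size, size * 2):
--             key_mat[i][j] = count_mat[i][j - size]
--     rotate(count_mat)
--
--     for i in range(size, size * 2):
--         for j in range(size, size * 2):
--             key_mat[i][j] = count_mat[i - size][j - size]
--     rotate(count_mat)
--
--     for i in range(size, size * 2):
--         for j in range(size):
--             key_mat[i][j] = count_mat[i - size][j]
--     return key_mat
-- ===== SOURCE B (Python) =====
-- def gen_rotation_matrix(size):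
--     top = [
--         [i * size + j + 1 for j in range(size)]
--         + [(size - 1 - j) * size + i + 1 for j in range(size)]
--         for i in range(size)
--     ]
--     bottom = [
--         [j * size + (size - 1 - i) + 1 for j in range(size)]
--         + [(size - 1 - i) * size + (size - 1 - j) + 1 for j in range(size)]
--         for i in range(size)
--     ]
--     return top + bottom
-- ===== Notes on version B (the rewrite author's own statement) =====
-- stated objective: simpler
-- what changed: B fills each of the four N-by-N quadrants directly with the closed-form value of the rotated numbering (entry formulas for the 0/90/180/270-degree rotations of count[i][j]=i*size+j+1), instead of building a count matrix, rotating it in place three times and copying it quadrant by quadrant.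
import Mathlib
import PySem

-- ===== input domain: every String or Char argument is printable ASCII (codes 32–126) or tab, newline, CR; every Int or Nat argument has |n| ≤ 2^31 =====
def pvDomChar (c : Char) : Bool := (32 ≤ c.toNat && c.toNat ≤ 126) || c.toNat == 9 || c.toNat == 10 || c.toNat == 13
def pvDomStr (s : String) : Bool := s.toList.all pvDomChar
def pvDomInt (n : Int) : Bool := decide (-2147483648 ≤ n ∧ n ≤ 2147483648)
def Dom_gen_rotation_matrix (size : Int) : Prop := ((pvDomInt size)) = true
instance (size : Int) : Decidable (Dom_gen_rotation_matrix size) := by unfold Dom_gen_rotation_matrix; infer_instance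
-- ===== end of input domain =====

-- B replaces A's build-count-matrix / rotate-in-place / copy-quadrant pipeline by filling each
-- quadrant directly with the closed-form value of the rotated numbering (objective: simpler).
-- A mutates only matrices it allocated itself, so return-value equivalence is full equivalence.

-- ===== PORT A =====
-- mat[i][j] read/write; exact here because every index A uses comes from `range`, hence is
-- non-negative and within the bounds of the matrices A itself allocated.
def pvGetV (m : List (List Int)) (i j : Int) : Int :=
  PySem.List.pyGetD (PySem.List.pyGetD m i []) j 0

def pvSetV (m : List (List Int)) (i j : Int) (v : Int) : List (List Int) :=
  PySem.List.pySetD m i (PySem.List.pySetD (PySem.List.pyGetD m i []) j v)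

def square_zeros (size : Int) : List (List Int) :=
  (PySem.List.pyRange 0 size 1).map (fun _ => List.replicate size.toNat 0)

def count_matrix (size : Int) : List (List Int) :=
  ((PySem.List.pyRange 0 size 1).foldl (fun st i =>
      (PySem.List.pyRange 0 size 1).foldl (fun st j =>
        (pvSetV st.1 i j st.2, st.2 + 1)) st)
    (square_zeros size, (1 : Int))).1

-- Python's rotate mutates in place (reverse, then transpose by simultaneous swaps);
-- here it returns the new matrix and A's port threads it through.
def rotate (mat : List (List Int)) : List (List Int) :=
  let m := mat.reverse
  (PySem.List.pyRange 0 (PySem.List.len m) 1).foldl (fun m i =>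
    (PySem.List.pyRange 0 i 1).foldl (fun m j =>
      pvSetV (pvSetV m i j (pvGetV m j i)) j i (pvGetV m i j)) m) m

def gen_rotation_matrix (size : Int) : List (List Int) :=
  let count_mat := count_matrix size
  let key0 := square_zeros (size * 2)
  let key1 := (PySem.List.pyRange 0 size 1).foldl (fun k i =>
      (PySem.List.pyRange 0 size 1).foldl (fun k j =>
        pvSetV k i j (pvGetV count_mat i j)) k) key0
  let c1 := rotate count_mat
  let key2 := (PySem.List.pyRange 0 size 1).foldl (fun k i =>
      (PySem.List.pyRange size (size * 2) 1).foldl (fun k j =>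
        pvSetV k i j (pvGetV c1 i (j - size))) k) key1
  let c2 := rotate c1
  let key3 := (PySem.List.pyRange size (size * 2) 1).foldl (fun k i =>
      (PySem.List.pyRange size (size * 2) 1).foldl (fun k j =>
        pvSetV k i j (pvGetV c2 (i - size) (j - size))) k) key2
  let c3 := rotate c2
  (PySem.List.pyRange size (size * 2) 1).foldl (fun k i =>
      (PySem.List.pyRange 0 size 1).foldl (fun k j =>
        pvSetV k i j (pvGetV c3 (i - size) j)) k) key3

-- ===== PORT B =====
def gen_rotation_matrix_alt (size : Int) : List (List Int) :=
  ((PySem.List.pyRange 0 size 1).map (fun i =>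
      (PySem.List.pyRange 0 size 1).map (fun j => i * size + j + 1)
      ++ (PySem.List.pyRange 0 size 1).map (fun j => (size - 1 - j) * size + i + 1)))
  ++ ((PySem.List.pyRange 0 size 1).map (fun i =>
      (PySem.List.pyRange 0 size 1).map (fun j => j * size + (size - 1 - i) + 1)
      ++ (PySem.List.pyRange 0 size 1).map (fun j => (size - 1 - i) * size + (size - 1 - j) + 1)))

-- ===== PRECONDITION & SPEC =====
def Spec_gen_rotation_matrix (size : Int) (out : List (List Int)) : Prop := out = gen_rotation_matrix_alt size
instance (size : Int) (out : List (List Int)) : Decidable (Spec_gen_rotation_matrix size out) := by unfold Spec_gen_rotation_matrix; infer_instance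

-- ===== CLAIM (what is proved, stated in full; the proofs are below) =====
def Claim_equal_gen_rotation_matrix : Prop := ∀ (size : Int), Dom_gen_rotation_matrix size → Spec_gen_rotation_matrix size (gen_rotation_matrix size)

-- ===== LEMMAS AND PROOFS =====

/-- The canonical `n × n` matrix with entry `f i j`. -/
def pvMk (n : Nat) (f : Nat → Nat → Int) : List (List Int) :=
  (List.range n).map (fun i => (List.range n).map (f i))

theorem pvMk_congr {n : Nat} {f g : Nat → Nat → Int}
    (h : ∀ a, a < n → ∀ b, b < n → f a b = g a b) : pvMk n f = pvMk n g := by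
  unfold pvMk
  refine List.map_congr_left (fun a ha => ?_)
  exact List.map_congr_left (fun b hb => h a (List.mem_range.mp ha) b (List.mem_range.mp hb))

theorem pv_getv_mk {n : Nat} (f : Nat → Nat → Int) {i j : Nat} (hi : i < n) (hj : j < n) :
    pvGetV (pvMk n f) (i : Int) (j : Int) = f i j := by
  simp only [pvGetV, pvMk, PySem.List.pyGetD_natCast, List.getD_eq_getElem?_getD,
    List.getElem?_map, List.getElem?_range, hi]
  simp [List.getElem?_range, hj]

theorem pv_set_map_range {α : Type} {n j : Nat} (g : Nat → α) (v : α) (hj : j < n) :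
    ((List.range n).map g).set j v = (List.range n).map (fun b => if b = j then v else g b) := by
  apply List.ext_getElem
  · simp
  · intro k h1 h2
    simp only [List.length_map, List.length_range] at h1 h2
    simp only [List.getElem_set, List.getElem_map, List.getElem_range]
    split_ifs with h3 h4 h4 <;> first | rfl | (exfalso; omega)

theorem pv_setv_mk {n : Nat} (f : Nat → Nat → Int) {i j : Nat} (hi : i < n) (hj : j < n) (v : Int) :
    pvSetV (pvMk n f) (i : Int) (j : Int) v
      = pvMk n (fun a b => if a = i ∧ b = j then v else f a b) := by
  simp only [pvSetV, pvMk, PySem.List.pySetD_natCast, PySem.List.pyGetD_natCast,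
    List.getD_eq_getElem?_getD, List.getElem?_map, List.getElem?_range, hi]
  simp only [if_pos hi, Option.map_some, Option.getD_some]
  rw [pv_set_map_range _ _ hj, pv_set_map_range _ _ hi]
  apply List.map_congr_left
  intro a ha
  split_ifs with h1
  · subst h1; apply List.map_congr_left; intro b hb; simp
  · apply List.map_congr_left; intro b hb; simp [h1]

theorem pv_foldl_pyRange_nat {α : Type} (n : Nat) (g : α → Int → α) (init : α) :
    (PySem.List.pyRange 0 (n : Int) 1).foldl g init
      = (List.range n).foldl (fun s (t : Nat) => g s (t : Int)) init := by
  rw [PySem.List.pyRange_one, List.foldl_map]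
  simp

theorem pv_foldl_pyRange_natShift {α : Type} (a n : Nat) (g : α → Int → α) (init : α) :
    (PySem.List.pyRange (a : Int) ((a : Int) + (n : Int)) 1).foldl g init
      = (List.range n).foldl (fun s (t : Nat) => g s ((a + t : Nat) : Int)) init := by
  rw [PySem.List.pyRange_one, List.foldl_map]
  have h : (((a : Int) + (n : Int)) - (a : Int)).toNat = n := by omega
  rw [h]
  congr 1

theorem pv_sqz_mk (m : Int) (n : Nat) (hm : m = (n : Int)) :
    square_zeros m = pvMk n (fun _ _ => 0) := by
  subst hm
  unfold square_zeros pvMk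
  rw [PySem.List.pyRange_one]
  simp only [Int.sub_zero, Int.toNat_natCast, List.map_map]
  apply List.map_congr_left
  intro a _
  simp [List.map_const']

-- inner loop of count_matrix: writes row I with consecutive values starting at k0
theorem pv_countRow {n : Nat} (h : Nat → Nat → Int) {I : Nat} (hI : I < n) (k0 : Int) :
    ∀ c, c ≤ n →
      (List.range c).foldl (fun st (j : Nat) => (pvSetV st.1 (I : Int) (j : Int) st.2, st.2 + 1))
        (pvMk n h, k0)
      = (pvMk n (fun a b => if a = I ∧ b < c then k0 + (b : Int) else h a b), k0 + (c : Int)) := by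
  intro c
  induction c with
  | zero =>
    intro _
    simp only [List.range_zero, List.foldl_nil, Nat.cast_zero, Int.add_zero]
    refine Prod.ext ?_ rfl
    exact (pvMk_congr (by intro a _ b _; simp)).symm
  | succ c ih =>
    intro hc
    rw [List.range_succ, List.foldl_append, ih (by omega)]
    simp only [List.foldl_cons, List.foldl_nil]
    rw [pv_setv_mk _ hI (by omega)]
    refine Prod.ext ?_ (by push_cast; ring)
    apply pvMk_congr
    intro a ha b hb
    split_ifs <;> first
      | rfl
      | (exfalso; omega)
      | (rw [show b = c from by omega])

theorem pv_countFill {n : Nat} (Z : Nat → Nat → Int) (k0 : Int) :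
    ∀ t, t ≤ n →
      (List.range t).foldl (fun st (i : Nat) =>
          (List.range n).foldl (fun st (j : Nat) => (pvSetV st.1 (i : Int) (j : Int) st.2, st.2 + 1)) st)
        (pvMk n Z, k0)
      = (pvMk n (fun a b => if a < t then k0 + (a : Int) * (n : Int) + (b : Int) else Z a b),
         k0 + (t : Int) * (n : Int)) := by
  intro t
  induction t with
  | zero =>
    intro _
    simp only [List.range_zero, List.foldl_nil, Nat.cast_zero, Int.zero_mul, Int.add_zero]
    refine Prod.ext ?_ rfl
    exact (pvMk_congr (by intro a _ b _; simp)).symm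
  | succ t ih =>
    intro ht
    rw [List.range_succ, List.foldl_append, ih (by omega)]
    simp only [List.foldl_cons, List.foldl_nil]
    rw [pv_countRow _ (by omega) _ n (le_refl n)]
    refine Prod.ext ?_ (by push_cast; ring)
    apply pvMk_congr
    intro a ha b hb
    split_ifs <;> first
      | rfl
      | (exfalso; omega)
      | (rw [show a = t from by omega]; try (push_cast; ring))

theorem pv_count_mk (n : Nat) :
    count_matrix (n : Int) = pvMk n (fun a b => 1 + (a : Int) * (n : Int) + (b : Int)) := by
  unfold count_matrix
  rw [pv_sqz_mk _ n rfl, pv_foldl_pyRange_nat]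
  have : ∀ (st : List (List Int) × Int) (i : Nat),
      (PySem.List.pyRange 0 (n : Int) 1).foldl (fun st j => (pvSetV st.1 (i:Int) j st.2, st.2 + 1)) st
      = (List.range n).foldl (fun st (j : Nat) => (pvSetV st.1 (i:Int) (j:Int) st.2, st.2 + 1)) st := by
    intro st i
    rw [pv_foldl_pyRange_nat]
  simp only [this]
  rw [pv_countFill _ 1 n (le_refl n)]
  apply pvMk_congr
  intro a ha b hb
  simp [ha]

theorem pv_reverse_mk (n : Nat) (f : Nat → Nat → Int) :
    (pvMk n f).reverse = pvMk n (fun i => f (n - 1 - i)) := by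
  apply List.ext_getElem
  · simp [pvMk]
  · intro i h1 h2
    simp only [pvMk, List.length_reverse, List.length_map, List.length_range] at h1 h2
    simp only [pvMk, List.getElem_reverse, List.getElem_map, List.getElem_range,
      List.length_map, List.length_range]

theorem pv_swapInner {n : Nat} (g : Nat → Nat → Int) {t : Nat} (ht : t < n) :
    ∀ s, s ≤ t →
      (List.range s).foldl (fun m (j : Nat) =>
          pvSetV (pvSetV m (t : Int) (j : Int) (pvGetV m (j : Int) (t : Int))) (j : Int) (t : Int)
            (pvGetV m (t : Int) (j : Int)))
        (pvMk n (fun a b => if a < t ∧ b < t then g b a else g a b))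
      = pvMk n (fun a b =>
          if (a < t ∧ b < t) ∨ (a = t ∧ b < s) ∨ (b = t ∧ a < s) then g b a else g a b) := by
  intro s
  induction s with
  | zero =>
    intro _
    simp only [List.range_zero, List.foldl_nil]
    apply pvMk_congr
    intro a ha b hb
    split_ifs <;> first | rfl | (exfalso; omega)
  | succ s ih =>
    intro hs
    have hs' : s < n := by omega
    rw [List.range_succ, List.foldl_append, ih (by omega)]
    simp only [List.foldl_cons, List.foldl_nil]
    rw [pv_getv_mk _ hs' ht, pv_getv_mk _ ht hs']
    rw [if_neg (by omega), if_neg (by omega)]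
    rw [pv_setv_mk _ ht hs', pv_setv_mk _ hs' ht]
    apply pvMk_congr
    intro a ha b hb
    split_ifs <;> first
      | rfl
      | (exfalso; omega)
      | (rw [show a = t from by omega, show b = s from by omega])
      | (rw [show a = s from by omega, show b = t from by omega])

theorem pv_swapOuter {n : Nat} (g : Nat → Nat → Int) :
    ∀ t, t ≤ n →
      (List.range t).foldl (fun m (i : Nat) =>
          (PySem.List.pyRange 0 (i : Int) 1).foldl (fun m j =>
            pvSetV (pvSetV m (i : Int) j (pvGetV m j (i : Int))) j (i : Int)
              (pvGetV m (i : Int) j)) m)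
        (pvMk n g)
      = pvMk n (fun a b => if a < t ∧ b < t then g b a else g a b) := by
  intro t
  induction t with
  | zero =>
    intro _
    simp only [List.range_zero, List.foldl_nil]
    apply pvMk_congr
    intro a ha b hb
    rw [if_neg (by omega)]
  | succ t ih =>
    intro ht
    rw [List.range_succ, List.foldl_append, ih (by omega)]
    simp only [List.foldl_cons, List.foldl_nil]
    rw [pv_foldl_pyRange_nat]
    rw [pv_swapInner g (by omega) t (le_refl t)]
    apply pvMk_congr
    intro a ha b hb
    split_ifs <;> first
      | rfl
      | (exfalso; omega)
      | (rw [show b = a from by omega])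

theorem pv_rotate_mk (n : Nat) (f : Nat → Nat → Int) :
    rotate (pvMk n f) = pvMk n (fun a b => f (n - 1 - b) a) := by
  simp only [rotate]
  rw [pv_reverse_mk]
  have hlen : PySem.List.len (pvMk n (fun i => f (n - 1 - i))) = (n : Int) := by
    simp [pvMk, PySem.List.len_eq]
  rw [hlen, pv_foldl_pyRange_nat, pv_swapOuter _ n (le_refl n)]
  apply pvMk_congr
  intro a ha b hb
  rw [if_pos ⟨ha, hb⟩]

-- one row of a rectangle fill
theorem pv_rowFill {m : Nat} (G : Nat → Nat → Int) {I co : Nat} (v : Nat → Int) (hI : I < m) :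
    ∀ c, co + c ≤ m →
      (List.range c).foldl (fun k (t : Nat) => pvSetV k (I : Int) ((co + t : Nat) : Int) (v t))
        (pvMk m G)
      = pvMk m (fun a b => if a = I ∧ co ≤ b ∧ b < co + c then v (b - co) else G a b) := by
  intro c
  induction c with
  | zero =>
    intro _
    simp only [List.range_zero, List.foldl_nil]
    apply pvMk_congr
    intro a ha b hb
    rw [if_neg (by omega)]
  | succ c ih =>
    intro hc
    rw [List.range_succ, List.foldl_append, ih (by omega)]
    simp only [List.foldl_cons, List.foldl_nil]
    rw [pv_setv_mk _ hI (by omega)]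
    apply pvMk_congr
    intro a ha b hb
    split_ifs <;> first
      | rfl
      | (exfalso; omega)
      | (rw [show b - co = c from by omega])

theorem pv_rectFill {m : Nat} {ro co r c : Nat} (G : Nat → Nat → Int) (v : Nat → Nat → Int)
    (hr : ro + r ≤ m) (hc : co + c ≤ m) :
    (List.range r).foldl (fun k (s : Nat) =>
        (List.range c).foldl (fun k (t : Nat) =>
          pvSetV k ((ro + s : Nat) : Int) ((co + t : Nat) : Int) (v s t)) k)
      (pvMk m G)
    = pvMk m (fun a b =>
        if ro ≤ a ∧ a < ro + r ∧ co ≤ b ∧ b < co + c then v (a - ro) (b - co) else G a b) := by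
  induction r generalizing G with
  | zero =>
    simp only [List.range_zero, List.foldl_nil]
    apply pvMk_congr
    intro a ha b hb
    rw [if_neg (by omega)]
  | succ r ih =>
    rw [List.range_succ, List.foldl_append, ih G (by omega)]
    simp only [List.foldl_cons, List.foldl_nil]
    rw [pv_rowFill _ (v r) (by omega) c hc]
    apply pvMk_congr
    intro a ha b hb
    split_ifs <;> first
      | rfl
      | (exfalso; omega)
      | (rw [show a - ro = r from by omega])


theorem pvMk_def (n : Nat) (f : Nat → Nat → Int) :
    pvMk n f = (List.range n).map (fun i => (List.range n).map (f i)) := rfl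

theorem pv_rectFill00 {m r c : Nat} (G : Nat → Nat → Int) (v : Nat → Nat → Int)
    (hr : r ≤ m) (hc : c ≤ m) :
    (List.range r).foldl (fun k (s : Nat) =>
        (List.range c).foldl (fun k (t : Nat) => pvSetV k (s : Int) (t : Int) (v s t)) k)
      (pvMk m G)
    = pvMk m (fun a b => if a < r ∧ b < c then v a b else G a b) := by
  have h := pv_rectFill (m := m) (ro := 0) (co := 0) (r := r) (c := c) G v (by omega) (by omega)
  simpa only [Nat.zero_add, Nat.zero_le, true_and, Nat.sub_zero] using h

theorem pv_rectFill0C {m co r c : Nat} (G : Nat → Nat → Int) (v : Nat → Nat → Int)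
    (hr : r ≤ m) (hc : co + c ≤ m) :
    (List.range r).foldl (fun k (s : Nat) =>
        (List.range c).foldl (fun k (t : Nat) => pvSetV k (s : Int) ((co + t : Nat) : Int) (v s t)) k)
      (pvMk m G)
    = pvMk m (fun a b => if a < r ∧ co ≤ b ∧ b < co + c then v a (b - co) else G a b) := by
  have h := pv_rectFill (m := m) (ro := 0) (co := co) (r := r) (c := c) G v (by omega) (by omega)
  simpa only [Nat.zero_add, Nat.zero_le, true_and, Nat.sub_zero] using h

theorem pv_rectFillR0 {m ro r c : Nat} (G : Nat → Nat → Int) (v : Nat → Nat → Int)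
    (hr : ro + r ≤ m) (hc : c ≤ m) :
    (List.range r).foldl (fun k (s : Nat) =>
        (List.range c).foldl (fun k (t : Nat) => pvSetV k ((ro + s : Nat) : Int) (t : Int) (v s t)) k)
      (pvMk m G)
    = pvMk m (fun a b => if ro ≤ a ∧ a < ro + r ∧ b < c then v (a - ro) b else G a b) := by
  have h := pv_rectFill (m := m) (ro := ro) (co := 0) (r := r) (c := c) G v (by omega) (by omega)
  simpa only [Nat.zero_add, Nat.zero_le, true_and, Nat.sub_zero] using h

theorem pv_main (size : Int) : gen_rotation_matrix size = gen_rotation_matrix_alt size := by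
  by_cases hneg : size < 0
  · have e1 : PySem.List.pyRange 0 size 1 = [] := PySem.List.pyRange_one_eq_nil (by omega)
    have e2 : PySem.List.pyRange size (size * 2) 1 = [] := PySem.List.pyRange_one_eq_nil (by omega)
    have e3 : PySem.List.pyRange 0 (size * 2) 1 = [] := PySem.List.pyRange_one_eq_nil (by omega)
    simp [gen_rotation_matrix, gen_rotation_matrix_alt, count_matrix, square_zeros, e1, e2, e3]
  · obtain ⟨n, rfl⟩ : ∃ n : Nat, size = (n : Int) := ⟨size.toNat, by omega⟩
    simp only [gen_rotation_matrix]
    rw [pv_count_mk n]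
    rw [pv_sqz_mk ((n : Int) * 2) (n + n) (by push_cast; ring)]
    rw [pv_rotate_mk, pv_rotate_mk, pv_rotate_mk]
    simp only [show ((n : Int) * 2) = (n : Int) + (n : Int) from by ring]
    simp only [pv_foldl_pyRange_natShift, pv_foldl_pyRange_nat]
    rw [pv_rectFill00 _ _ (by omega) (by omega)]
    rw [pv_rectFill0C _ _ (by omega) (by omega)]
    rw [pv_rectFill _ _ (by omega) (by omega)]
    rw [pv_rectFillR0 _ _ (by omega) (by omega)]
    conv_lhs => rw [pvMk_def]
    simp only [gen_rotation_matrix_alt, PySem.List.pyRange_one, Int.sub_zero, Int.toNat_natCast,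
      List.map_map, zero_add]
    rw [List.range_add, List.map_append]
    congr 1
    · apply List.map_congr_left
      intro i hi
      have hi' := List.mem_range.mp hi
      simp only [Function.comp]
      rw [List.map_append, List.map_map]
      congr 1
      · apply List.map_congr_left
        intro j hj
        have hj' := List.mem_range.mp hj
        simp only [Function.comp]
        split_ifs
        all_goals try (exfalso; omega)
        rw [pv_getv_mk _ hi' hj']
        push_cast; ring
      · apply List.map_congr_left
        intro j hj
        have hj' := List.mem_range.mp hj
        simp only [Function.comp]
        split_ifs
        all_goals try (exfalso; omega)
        simp only [Nat.add_sub_cancel_left]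
        rw [show ((n + j : Nat) : Int) - (n : Int) = (j : Int) from by push_cast; ring]
        rw [pv_getv_mk _ hi' hj']
        rw [show ((n - 1 - j : Nat) : Int) = (n : Int) - 1 - (j : Int) from by omega]
        ring
    · rw [List.map_map]
      apply List.map_congr_left
      intro i hi
      have hi' := List.mem_range.mp hi
      simp only [Function.comp]
      rw [List.map_append, List.map_map]
      congr 1
      · apply List.map_congr_left
        intro j hj
        have hj' := List.mem_range.mp hj
        simp only [Function.comp]
        split_ifs
        all_goals try (exfalso; omega)
        simp only [Nat.add_sub_cancel_left]
        rw [show ((n + i : Nat) : Int) - (n : Int) = (i : Int) from by push_cast; ring]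
        rw [pv_getv_mk _ hi' hj']
        rw [show n - 1 - (n - 1 - j) = j from by omega]
        rw [show ((n - 1 - i : Nat) : Int) = (n : Int) - 1 - (i : Int) from by omega]
        ring
      · apply List.map_congr_left
        intro j hj
        have hj' := List.mem_range.mp hj
        simp only [Function.comp]
        split_ifs
        all_goals try (exfalso; omega)
        simp only [Nat.add_sub_cancel_left]
        rw [show ((n + i : Nat) : Int) - (n : Int) = (i : Int) from by push_cast; ring]
        rw [show ((n + j : Nat) : Int) - (n : Int) = (j : Int) from by push_cast; ring]
        rw [pv_getv_mk _ hi' hj']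
        rw [show ((n - 1 - i : Nat) : Int) = (n : Int) - 1 - (i : Int) from by omega]
        rw [show ((n - 1 - j : Nat) : Int) = (n : Int) - 1 - (j : Int) from by omega]
        ring

-- ===== VERDICT (by name: the statement is the Claim_ definition above) =====
theorem gen_rotation_matrix_spec : Claim_equal_gen_rotation_matrix := by
  intro size _
  unfold Spec_gen_rotation_matrix
  exact pv_main size
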